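-- pv_equiv track=rewrite | github.com/cutz-j/AlgorithmStudy | Programmers/[cutz]marathon.py | solution
-- ===== SOURCE A (Python) =====
-- from collections import defaultdict
--
-- def solution(participant: list, completion: list) -> str:
--     answer = ''
--     comp_dict = defaultdict(int)
--     for com in completion:
--         comp_dict[com] += 1
--
--     for part in participant:
--         comp_dict[part] -= 1
--         if comp_dict[part] < 0:
--             return part
-- ===== SOURCE B (Python) =====
-- def solution(participant, completion):
--     for i, part in enumerate(participant):
--         if participant[:i+1].count(part) > completion.count(part):
--             return part
--     return None
-- ===== Notes on version B (the rewrite author's own statement) =====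
-- stated objective: simpler
-- what changed: Replaced the defaultdict counter table and its decrement loop by a direct scan that returns the first participant whose prefix occurrence count exceeds their completion count.
-- outside the precondition, e.g. on solution(['a'], ['a']): A returns None, B returns None
import Mathlib
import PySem

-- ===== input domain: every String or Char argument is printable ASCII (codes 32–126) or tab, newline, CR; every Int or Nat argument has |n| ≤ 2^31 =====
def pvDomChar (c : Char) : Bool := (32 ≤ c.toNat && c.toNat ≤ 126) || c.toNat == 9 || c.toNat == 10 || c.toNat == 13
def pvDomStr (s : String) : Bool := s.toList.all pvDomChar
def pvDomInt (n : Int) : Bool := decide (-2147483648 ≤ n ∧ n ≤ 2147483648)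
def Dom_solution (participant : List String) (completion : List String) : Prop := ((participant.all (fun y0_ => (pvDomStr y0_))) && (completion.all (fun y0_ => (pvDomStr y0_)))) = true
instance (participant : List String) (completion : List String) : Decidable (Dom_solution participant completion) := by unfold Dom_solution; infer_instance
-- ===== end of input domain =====

-- B replaces A's defaultdict counter by a direct prefix-count scan (simpler; not faster).

-- ===== PORT A =====
-- the 'for part in participant' loop: decrement, test, maybe return
def solutionLoopA (d : PySem.Dict String Int) : List String → String
  | [] => ""            -- Python falls off the end and returns None; Pre_solution excludes this
  | part :: rest =>
    let d' := d.modify part 0 (· - 1)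
    if d'.getD part 0 < 0 then part else solutionLoopA d' rest

def solution (participant : List String) (completion : List String) : String :=
  let compDict := completion.foldl (fun d com => d.modify com 0 (· + 1)) PySem.Dict.empty
  solutionLoopA compDict participant

-- ===== PORT B =====
-- the 'for i, part in enumerate(participant)' loop of Source B
def solutionLoopB (participant : List String) (completion : List String) : List (Int × String) → String
  | [] => ""            -- Python falls off the end and returns None; Pre_solution excludes this
  | (i, part) :: rest =>
    if (PySem.List.slice participant none (some (i + 1))).count part > completion.count part
    then part else solutionLoopB participant completion rest

def solution_alt (participant : List String) (completion : List String) : String :=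
  solutionLoopB participant completion (PySem.List.enumerate participant 0)

-- ===== PRECONDITION & SPEC =====
-- Pre_ excludes exactly the inputs on which every participant is matched by a completion:
-- there Python A (and B) return None, which is not a value of the declared str type.
def Pre_solution (participant : List String) (completion : List String) : Prop :=
  ∃ p ∈ participant, completion.count p < participant.count p
instance (participant : List String) (completion : List String) : Decidable (Pre_solution participant completion) := by unfold Pre_solution; infer_instance

def pvWitness_solution : List String × List String := (["leo", "kiki", "eden"], ["eden", "kiki"])

def Spec_solution (participant : List String) (completion : List String) (out : String) : Prop := out = solution_alt participant completion
instance (participant : List String) (completion : List String) (out : String) : Decidable (Spec_solution participant completion out) := by unfold Spec_solution; infer_instance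

-- ===== CLAIM (what is proved, stated in full; the proofs are below) =====
def Claim_equal_solution : Prop := ∀ (participant : List String) (completion : List String), Dom_solution participant completion → Pre_solution participant completion → Spec_solution participant completion (solution participant completion)

-- ===== LEMMAS AND PROOFS =====

-- invariant: d holds completion-count minus prefix-count for every name;
-- then A's decrement loop on `rest` agrees with B's scan of `enumerate rest pre.length`.
lemma loop_eq (completion : List String) :
    ∀ (rest pre : List String) (d : PySem.Dict String Int),
      (∀ s, d.getD s 0 = (completion.count s : Int) - (pre.count s : Int)) →
      solutionLoopA d rest
        = solutionLoopB (pre ++ rest) completion (PySem.List.enumerate rest (pre.length : Int)) := by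
  intro rest
  induction rest with
  | nil => intro pre d _; simp [solutionLoopA, solutionLoopB, PySem.List.enumerate_nil]
  | cons part rest ih =>
    intro pre d hd
    rw [PySem.List.enumerate_cons]
    simp only [solutionLoopA, solutionLoopB]
    have hsl : PySem.List.slice (pre ++ part :: rest) none (some ((pre.length : Int) + 1))
        = pre ++ [part] := by
      have : ((pre.length : Int) + 1) = ((pre.length + 1 : Nat) : Int) := by push_cast; ring
      rw [this, PySem.List.slice_to_natCast]
      rw [show pre ++ part :: rest = (pre ++ [part]) ++ rest by simp]
      rw [List.take_append_of_le_length (by simp)]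
      simp
    have hdp : (d.modify part 0 (· - 1)).getD part 0
        = (completion.count part : Int) - (pre.count part : Int) - 1 := by
      rw [PySem.Dict.getD_modify_self, hd]
    have hcount : ((pre ++ [part]).count part : Nat) = pre.count part + 1 := by
      simp [List.count_append]
    rw [hsl]
    by_cases hc : (completion.count part : Int) - (pre.count part : Int) - 1 < 0
    · rw [if_pos (by rw [hdp]; omega), if_pos (by omega)]
    · rw [if_neg (by rw [hdp]; omega), if_neg (by omega)]
      have h2 := ih (pre ++ [part]) (d.modify part 0 (· - 1)) (by
        intro s
        by_cases hs : s = part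
        · subst hs
          rw [PySem.Dict.getD_modify_self, hd]
          simp [List.count_append]
          ring
        · rw [PySem.Dict.getD_modify_of_ne _ _ _ hs, hd]
          have : List.count s (pre ++ [part]) = List.count s pre := by
            simp [List.count_append, Ne.symm hs]
          rw [this])
      rw [h2]
      have hlen : ((pre ++ [part]).length : Int) = (pre.length : Int) + 1 := by simp
      rw [hlen]
      simp

-- ===== VERDICT (by name: the statement is the Claim_ definition above) =====
theorem solution_spec : Claim_equal_solution := by
  intro participant completion _ _
  unfold Spec_solution solution solution_alt
  have h := loop_eq completion participant [] (completion.foldl (fun d com => d.modify com 0 (· + 1)) PySem.Dict.empty)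
    (by intro s; rw [PySem.Dict.getD_foldl_modify_add_one]; simp)
  simpa using h
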